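-- pv_equiv track=rewrite | github.com/trevor-reznik/coding-assignments | python01/prep33.py | get_ok_items
-- ===== SOURCE A (Python) =====
-- def get_ok_items(carryon, personal, restricted):
--     a = []
--     for _ in carryon:
--         if _ in restricted:
--             a.append(_)
--     for _ in a:
--         carryon.discard(_)
--     a = []
--     for _ in personal:
--         if _ in restricted:
--             a.append(_)
--     for _ in a:
--         personal.discard(_)
--     personal.update(carryon)
--     return personal
-- ===== SOURCE B (Python) =====
-- def get_ok_items(carryon, personal, restricted):
--     for r in restricted:
--         carryon.discard(r)
--         personal.discard(r)
--     personal.update(carryon)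
--     return personal
-- ===== Notes on version B (the rewrite author's own statement) =====
-- stated objective: simpler
-- what changed: B iterates the restricted collection once, discarding each restricted item from both sets directly, instead of A's four loops (scan each set to collect restricted members into an intermediate list, then a second pass discarding them); the intermediate lists disappear.
import Mathlib
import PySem

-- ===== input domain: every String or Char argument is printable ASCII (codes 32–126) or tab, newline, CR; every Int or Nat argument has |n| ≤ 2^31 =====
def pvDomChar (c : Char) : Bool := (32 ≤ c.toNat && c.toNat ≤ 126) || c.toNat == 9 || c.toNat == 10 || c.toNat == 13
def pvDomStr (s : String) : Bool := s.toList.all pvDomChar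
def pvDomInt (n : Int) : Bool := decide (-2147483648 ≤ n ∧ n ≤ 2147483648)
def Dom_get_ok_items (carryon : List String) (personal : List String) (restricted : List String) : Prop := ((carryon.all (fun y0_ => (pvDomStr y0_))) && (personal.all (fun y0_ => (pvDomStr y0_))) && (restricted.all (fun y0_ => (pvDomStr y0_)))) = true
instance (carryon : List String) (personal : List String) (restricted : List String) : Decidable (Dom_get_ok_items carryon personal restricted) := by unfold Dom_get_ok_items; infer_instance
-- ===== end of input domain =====

-- B iterates restricted once and discards from both sets directly, dropping A's intermediate collect-then-discard lists (objective: simpler).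
-- Note: the Python programs mutate carryon/personal in place; the equivalence here is about the return value.

-- ===== PORT A =====
def get_ok_items (carryon : List String) (personal : List String) (restricted : List String) : List String :=
  -- a = []; for _ in carryon: if _ in restricted: a.append(_)
  let a := carryon.foldl (fun acc x => if restricted.contains x then acc ++ [x] else acc) []
  -- for _ in a: carryon.discard(_)
  let carryon := a.foldl (fun s x => PySem.Set.discard s x) carryon
  -- a = []; for _ in personal: if _ in restricted: a.append(_)
  let a := personal.foldl (fun acc x => if restricted.contains x then acc ++ [x] else acc) []
  -- for _ in a: personal.discard(_)
  let personal := a.foldl (fun s x => PySem.Set.discard s x) personal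
  -- personal.update(carryon); return personal
  PySem.Set.update personal carryon

-- ===== PORT B =====
def get_ok_items_alt (carryon : List String) (personal : List String) (restricted : List String) : List String :=
  -- for r in restricted: carryon.discard(r); personal.discard(r)
  let cp := restricted.foldl (fun (s : List String × List String) r =>
      (PySem.Set.discard s.1 r, PySem.Set.discard s.2 r)) (carryon, personal)
  -- personal.update(carryon); return personal
  PySem.Set.update cp.2 cp.1

-- ===== PRECONDITION & SPEC =====
def Spec_get_ok_items (carryon : List String) (personal : List String) (restricted : List String) (out : List String) : Prop := out = get_ok_items_alt carryon personal restricted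
instance (carryon : List String) (personal : List String) (restricted : List String) (out : List String) : Decidable (Spec_get_ok_items carryon personal restricted out) := by unfold Spec_get_ok_items; infer_instance

-- ===== CLAIM (what is proved, stated in full; the proofs are below) =====
def Claim_equal_get_ok_items : Prop := ∀ (carryon : List String) (personal : List String) (restricted : List String), Dom_get_ok_items carryon personal restricted → Spec_get_ok_items carryon personal restricted (get_ok_items carryon personal restricted)

-- ===== LEMMAS AND PROOFS =====

theorem pv_discard_eq_filter (s : List String) (x : String) :
    PySem.Set.discard s x = s.filter (fun y => !(y == x)) := by
  simp [PySem.Set.discard]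

-- Discarding every element of l from s filters out the members of l, in one go.
theorem pv_foldl_discard (l s : List String) :
    l.foldl (fun s x => PySem.Set.discard s x) s = s.filter (fun x => !l.contains x) := by
  induction l generalizing s with
  | nil => simp
  | cons x t ih =>
    rw [List.foldl_cons, ih, pv_discard_eq_filter, List.filter_filter]
    apply List.filter_congr
    intro y _
    by_cases h : y = x <;> simp [h]

-- The collect loop is a filter.
theorem pv_collect_eq_filter (l r : List String) :
    l.foldl (fun acc x => if r.contains x then acc ++ [x] else acc) [] = l.filter (fun x => r.contains x) := by
  rw [PySem.List.foldl_append_if_eq_filter]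
  simp only [List.nil_append]

-- A's collect-then-discard on s equals filtering s by non-membership in r.
theorem pv_phase (s r : List String) :
    (s.foldl (fun acc x => if r.contains x then acc ++ [x] else acc) []).foldl
      (fun s x => PySem.Set.discard s x) s = s.filter (fun x => !r.contains x) := by
  rw [pv_collect_eq_filter, pv_foldl_discard]
  apply List.filter_congr
  intro y hy
  by_cases h : y ∈ r
  · simp [List.mem_filter, hy, h]
  · simp [List.mem_filter, h]

-- ===== VERDICT (by name: the statement is the Claim_ definition above) =====
theorem get_ok_items_spec : Claim_equal_get_ok_items := by
  intro carryon personal restricted _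
  unfold Spec_get_ok_items get_ok_items get_ok_items_alt
  rw [PySem.List.foldl_prod_mk (f := fun s r => PySem.Set.discard s r) (g := fun s r => PySem.Set.discard s r)]
  simp only [pv_phase]
  simp only [pv_foldl_discard]
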